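-- pv_equiv track=rewrite | github.com/J0hnG4lt/IA2 | proyecto_libre/extractFeatures.py | frecuenciaLenguajes
-- ===== SOURCE A (Python) =====
-- def frecuenciaLenguajes(data) :
--     langs = {}
--     numberOfRepos = 0
--     for userAccount in data :
--         for repo in data[userAccount] :
--             numberOfRepos += 1
--             for lang in data[userAccount][repo] :
--                 if lang in langs :
--                     langs[lang] += 1
--                 else :
--                     langs[lang] = 1
--
--     return [langs,numberOfRepos]
-- ===== SOURCE B (Python) =====
-- def frecuenciaLenguajes(data):
--     # pass 1: repo total, independent of languages
--     numberOfRepos = sum(len(data[u]) for u in data)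
--     # pass 2: flatten every language occurrence into one list
--     allLangs = [lang for u in data for repo in data[u] for lang in data[u][repo]]
--     # distinct languages in first-occurrence order, then one count() per key
--     langs = dict.fromkeys(allLangs)
--     for lang in langs:
--         langs[lang] = allLangs.count(lang)
--     return [langs, numberOfRepos]
-- ===== Notes on version B (the rewrite author's own statement) =====
-- stated objective: alternative
-- what changed: A threads an incremental frequency dict and a repo counter through one interleaved triple loop; B never counts incrementally: it sums repo-dict sizes in one pass, flattens all language occurrences into a list, dedups it to the distinct keys (dict.fromkeys), and computes each frequency as a separate allLangs.count(lang) scan per distinct key.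
import Mathlib
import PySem

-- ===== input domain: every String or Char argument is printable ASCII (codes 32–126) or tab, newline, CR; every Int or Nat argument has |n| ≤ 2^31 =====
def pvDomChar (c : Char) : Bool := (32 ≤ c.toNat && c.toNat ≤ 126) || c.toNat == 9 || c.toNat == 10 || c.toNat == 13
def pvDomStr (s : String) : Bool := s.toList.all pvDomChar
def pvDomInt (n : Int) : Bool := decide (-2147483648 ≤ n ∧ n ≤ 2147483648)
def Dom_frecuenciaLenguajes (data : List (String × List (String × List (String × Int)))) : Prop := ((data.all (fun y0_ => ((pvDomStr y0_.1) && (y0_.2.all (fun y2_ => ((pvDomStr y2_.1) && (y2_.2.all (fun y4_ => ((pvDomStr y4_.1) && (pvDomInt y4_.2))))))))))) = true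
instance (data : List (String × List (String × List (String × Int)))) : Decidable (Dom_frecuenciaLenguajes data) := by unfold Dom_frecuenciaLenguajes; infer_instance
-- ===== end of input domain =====

-- B replaces A's interleaved incremental counting with: a repo-size sum, a flattened
-- language list, ordered dedup of its keys, and one list.count scan per distinct key.
-- Objective: alternative algorithm; not claimed faster.

-- ===== PORT A =====
-- A's one nested loop threading (langs-dict, repo-counter) state together.
def frecuenciaLenguajes (data : List (String × List (String × List (String × Int)))) : (List (String × Int)) × Int :=
  let res := data.foldl
    (fun st user => user.2.foldl
      (fun st repo =>
        let st' := (st.1, st.2 + 1)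
        repo.2.foldl
          (fun st lang =>
            if st.1.contains lang.1 then (st.1.modify lang.1 0 (· + 1), st.2)
            else (st.1.insert lang.1 1, st.2)) st') st)
    ((PySem.Dict.empty : PySem.Dict String Int), (0 : Int))
  (res.1.items, res.2)

-- ===== PORT B =====
-- B: repo count is its own sum; then flatten all languages, dedup to first-occurrence
-- keys, and pair each distinct key with its list.count over the flattened list.
def frecuenciaLenguajes_alt (data : List (String × List (String × List (String × Int)))) : (List (String × Int)) × Int :=
  let numberOfRepos : Int := (data.map (fun user => (user.2.length : Int))).sum
  let allLangs := data.flatMap (fun user => user.2.flatMap (fun repo => repo.2.map Prod.fst))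
  let langs := (PySem.List.dedup allLangs).map (fun lang => (lang, (PySem.List.count allLangs lang : Int)))
  (langs, numberOfRepos)

-- ===== PRECONDITION & SPEC =====
def Spec_frecuenciaLenguajes (data : List (String × List (String × List (String × Int)))) (out : (List (String × Int)) × Int) : Prop := out = frecuenciaLenguajes_alt data
instance (data : List (String × List (String × List (String × Int)))) (out : (List (String × Int)) × Int) : Decidable (Spec_frecuenciaLenguajes data out) := by unfold Spec_frecuenciaLenguajes; infer_instance

-- ===== CLAIM (what is proved, stated in full; the proofs are below) =====
def Claim_equal_frecuenciaLenguajes : Prop := ∀ (data : List (String × List (String × List (String × Int)))), Dom_frecuenciaLenguajes data → Spec_frecuenciaLenguajes data (frecuenciaLenguajes data)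

-- ===== LEMMAS AND PROOFS =====

-- A's branch on membership is exactly the unconditional counter step.
theorem pv_step_eq (d : PySem.Dict String Int) (x : String) (n : Int) :
    (if d.contains x then (d.modify x 0 (· + 1), n) else (d.insert x 1, n))
      = (d.modify x 0 (· + 1), n) := by
  by_cases h : d.contains x = true
  · simp [h]
  · have h0 : d.getD x 0 = 0 := PySem.Dict.getD_of_not_contains d 0 (by simpa using h)
    simp [h, PySem.Dict.modify, h0]

-- innermost loop: counts into the dict, leaves the repo counter alone
theorem pv_lang_loop (langs : List (String × Int)) (d : PySem.Dict String Int) (n : Int) :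
    langs.foldl
      (fun st lang =>
        if st.1.contains lang.1 then (st.1.modify lang.1 0 (· + 1), st.2)
        else (st.1.insert lang.1 1, st.2)) (d, n)
    = ((langs.map Prod.fst).foldl (fun d x => d.modify x 0 (· + 1)) d, n) := by
  induction langs generalizing d with
  | nil => rfl
  | cons hd tl ih =>
      simp only [List.foldl_cons, List.map_cons]
      rw [show (if (d, n).1.contains hd.1 then ((d, n).1.modify hd.1 0 (· + 1), (d, n).2)
            else ((d, n).1.insert hd.1 1, (d, n).2)) = (d.modify hd.1 0 (· + 1), n)
          from pv_step_eq d hd.1 n]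
      exact ih _

-- middle loop over one user's repos
theorem pv_repo_loop (repos : List (String × List (String × Int))) (d : PySem.Dict String Int) (n : Int) :
    repos.foldl
      (fun st repo =>
        let st' := (st.1, st.2 + 1)
        repo.2.foldl
          (fun st lang =>
            if st.1.contains lang.1 then (st.1.modify lang.1 0 (· + 1), st.2)
            else (st.1.insert lang.1 1, st.2)) st') (d, n)
    = ((repos.flatMap (fun repo => repo.2.map Prod.fst)).foldl (fun d x => d.modify x 0 (· + 1)) d,
       n + (repos.length : Int)) := by
  induction repos generalizing d n with
  | nil => simp
  | cons hd tl ih =>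
      simp only [List.foldl_cons, List.flatMap_cons, List.foldl_append]
      rw [pv_lang_loop, ih]
      simp only [Prod.mk.injEq, List.length_cons]
      exact ⟨trivial, by push_cast; ring⟩

-- outer loop over users
theorem pv_user_loop (data : List (String × List (String × List (String × Int))))
    (d : PySem.Dict String Int) (n : Int) :
    data.foldl
      (fun st user => user.2.foldl
        (fun st repo =>
          let st' := (st.1, st.2 + 1)
          repo.2.foldl
            (fun st lang =>
              if st.1.contains lang.1 then (st.1.modify lang.1 0 (· + 1), st.2)
              else (st.1.insert lang.1 1, st.2)) st') st) (d, n)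
    = ((data.flatMap (fun user => user.2.flatMap (fun repo => repo.2.map Prod.fst))).foldl
         (fun d x => d.modify x 0 (· + 1)) d,
       n + (data.map (fun user => (user.2.length : Int))).sum) := by
  induction data generalizing d n with
  | nil => simp
  | cons hd tl ih =>
      simp only [List.foldl_cons, List.flatMap_cons, List.foldl_append, List.map_cons, List.sum_cons]
      rw [pv_repo_loop, ih]
      simp only [Prod.mk.injEq]
      exact ⟨trivial, by ring⟩

-- ===== VERDICT (by name: the statement is the Claim_ definition above) =====
theorem frecuenciaLenguajes_spec : Claim_equal_frecuenciaLenguajes := by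
  intro data _
  unfold Spec_frecuenciaLenguajes frecuenciaLenguajes frecuenciaLenguajes_alt
  rw [pv_user_loop]
  simp [← PySem.Dict.counter_eq_foldl, PySem.Dict.items_counter, PySem.List.count_eq,
        PySem.List.dedup_eq_ofList]
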